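-- pv_equiv track=rewrite | github.com/Cyberfortress-Labs/Cyberfortress-SmartXDR-Core | app/middleware/auth.py | check_permission
-- ===== SOURCE A (Python) =====
-- def check_permission(key_info: dict, required_permission: str) -> bool:
--     """Check if key has required permission"""
--     permissions = key_info.get('permissions', [])
--
--     # Wildcard - full access
--     if '*' in permissions:
--         return True
--
--     # Exact match
--     if required_permission in permissions:
--         return True
--
--     # Prefix match (e.g., 'enrich:*' matches 'enrich:explain')
--     for perm in permissions:
--         if perm.endswith(':*'):
--             prefix = perm[:-1]  # Remove '*'
--             if required_permission.startswith(prefix):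
--                 return True
--
--     return False
-- ===== SOURCE B (Python) =====
-- def check_permission(key_info: dict, required_permission: str) -> bool:
--     """Check if key has required permission"""
--     perms = set(key_info.get('permissions', []))
--     candidates = ['*', required_permission]
--     for i, ch in enumerate(required_permission):
--         if ch == ':':
--             candidates.append(required_permission[:i + 1] + '*')
--     return any(c in perms for c in candidates)
-- ===== Notes on version B (the rewrite author's own statement) =====
-- stated objective: alternative
-- what changed: Instead of scanning the permission list and testing endswith/startswith per entry, B builds a set of permissions once and generates the O(#colons) candidate grant strings from the query string ('*', the permission itself, and each colon-prefix plus '*'), answering with set lookups.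
import Mathlib
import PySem

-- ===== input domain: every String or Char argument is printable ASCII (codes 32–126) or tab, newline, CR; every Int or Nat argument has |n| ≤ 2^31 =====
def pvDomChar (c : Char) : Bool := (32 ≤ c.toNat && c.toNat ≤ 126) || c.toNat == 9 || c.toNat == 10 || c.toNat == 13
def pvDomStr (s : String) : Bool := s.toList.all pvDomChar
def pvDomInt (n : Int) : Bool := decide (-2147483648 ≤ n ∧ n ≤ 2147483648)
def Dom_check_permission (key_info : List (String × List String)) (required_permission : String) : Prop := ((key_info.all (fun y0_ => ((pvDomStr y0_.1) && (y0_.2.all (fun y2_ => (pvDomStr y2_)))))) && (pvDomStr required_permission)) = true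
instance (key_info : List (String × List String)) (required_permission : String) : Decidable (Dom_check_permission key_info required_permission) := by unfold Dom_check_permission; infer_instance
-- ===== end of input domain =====

-- B builds the permission set once and looks up the O(#colons) candidate grant strings derived
-- from the query, instead of scanning the list with endswith/startswith tests (objective: alternative).

-- ===== PORT A =====
def check_permission (key_info : List (String × List String)) (required_permission : String) : Bool :=
  let permissions := (PySem.Dict.mk key_info).getD "permissions" []
  if permissions.contains "*" then true
  else if permissions.contains required_permission then true
  else
    permissions.foldl
      (fun ok perm =>
        if PySem.Str.endswith perm ":*" then
          let pfx := PySem.Str.slice perm none (some (-1))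
          if PySem.Str.startswith required_permission pfx then true else ok
        else ok)
      false

-- ===== PORT B =====
def check_permission_alt (key_info : List (String × List String)) (required_permission : String) : Bool :=
  let perms : PySem.Set String := PySem.Set.ofList ((PySem.Dict.mk key_info).getD "permissions" [])
  let candidates : List String :=
    (PySem.List.enumerate required_permission.toList 0).foldl
      (fun acc p =>
        if p.2 == ':' then
          acc ++ [String.ofList (required_permission.toList.take (p.1.toNat + 1) ++ ['*'])]
        else acc)
      ["*", required_permission]
  candidates.any (fun c => PySem.Set.contains perms c)

-- ===== PRECONDITION & SPEC =====
def Spec_check_permission (key_info : List (String × List String)) (required_permission : String) (out : Bool) : Prop := out = check_permission_alt key_info required_permission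
instance (key_info : List (String × List String)) (required_permission : String) (out : Bool) : Decidable (Spec_check_permission key_info required_permission out) := by unfold Spec_check_permission; infer_instance

-- ===== CLAIM (what is proved, stated in full; the proofs are below) =====
def Claim_equal_check_permission : Prop := ∀ (key_info : List (String × List String)) (required_permission : String), Dom_check_permission key_info required_permission → Spec_check_permission key_info required_permission (check_permission key_info required_permission)

-- ===== LEMMAS AND PROOFS =====

-- A's prefix-loop hit ↔ one of B's colon candidates is a listed permission.
theorem core_iff (ps : List String) (l : List Char) :
    (∃ p ∈ ps, ([':', '*'] <:+ p.toList) ∧ (p.toList.dropLast <+: l)) ↔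
    (∃ k, ∃ _ : k < l.length, l[k]'(by omega) = ':' ∧ String.ofList (l.take (k + 1) ++ ['*']) ∈ ps) := by
  constructor
  · rintro ⟨p, hp, ⟨q, hq⟩, hpre⟩
    have hdrop : p.toList.dropLast = q ++ [':'] := by
      rw [← hq]
      have h2 : q ++ [':', '*'] = (q ++ [':']) ++ ['*'] := by simp
      rw [h2, List.dropLast_concat]
    rw [hdrop] at hpre
    have hlen : q.length + 1 ≤ l.length := by
      have := hpre.length_le; simpa using this
    have hk : q.length < l.length := by omega
    have htake : l.take (q.length + 1) = q ++ [':'] := by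
      have := List.prefix_iff_eq_take.mp hpre
      simpa using this.symm
    refine ⟨q.length, hk, ?_, ?_⟩
    · have hsome : l[q.length]? = some ':' := by
        have h1 : (l.take (q.length + 1))[q.length]? = l[q.length]? := by simp
        rw [← h1, htake]
        simp
      simpa [List.getElem?_eq_getElem hk] using hsome
    · rw [htake]
      have h3 : (q ++ [':']) ++ ['*'] = q ++ [':', '*'] := by simp
      rw [h3, hq]
      simpa using hp
  · rintro ⟨k, hk, hc, hmem⟩
    refine ⟨String.ofList (l.take (k + 1) ++ ['*']), hmem, ?_, ?_⟩
    · rw [String.toList_ofList]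
      have ht : l.take (k + 1) = l.take k ++ [':'] := by
        rw [List.take_add_one, List.getElem?_eq_getElem hk]
        simp [hc]
      exact ⟨l.take k, by rw [ht]; simp⟩
    · rw [String.toList_ofList, List.dropLast_concat]
      exact List.take_prefix _ _

-- B's colon-candidate scan, characterized.
theorem cand_iff (ps : List String) (l : List Char) :
    (∃ x ∈ ((PySem.List.enumerate l 0).filter (fun p => p.2 == ':')).map
        (fun p : Int × Char => String.ofList (l.take (p.1.toNat + 1) ++ ['*'])), x ∈ ps) ↔
    (∃ k, ∃ _ : k < l.length, l[k]'(by omega) = ':' ∧ String.ofList (l.take (k + 1) ++ ['*']) ∈ ps) := by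
  constructor
  · rintro ⟨x, hx, hxp⟩
    simp only [List.mem_map, List.mem_filter] at hx
    obtain ⟨⟨i, ch⟩, ⟨hen, hch⟩, hfx⟩ := hx
    obtain ⟨k, hk, hpk⟩ := (PySem.List.mem_enumerate_iff _ _ _).mp hen
    have hik : i = (k : Int) := by simpa using congrArg Prod.fst hpk
    have hchk : ch = l[k] := by simpa using congrArg Prod.snd hpk
    have hcolon : l[k] = ':' := by rw [← hchk]; simpa using hch
    refine ⟨k, hk, hcolon, ?_⟩
    rw [← hfx] at hxp
    simpa [hik] using hxp
  · rintro ⟨k, hk, hc, hmem⟩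
    refine ⟨String.ofList (l.take (k + 1) ++ ['*']), ?_, hmem⟩
    simp only [List.mem_map, List.mem_filter]
    refine ⟨((k : Int), ':'), ⟨(PySem.List.mem_enumerate_iff _ _ _).mpr ⟨k, hk, by simp [hc]⟩, by simp⟩, by simp⟩

-- A's whole body, characterized.
theorem a_char (ps : List String) (rp : String) :
    (if ps.contains "*" then true
     else if ps.contains rp then true
     else
       ps.foldl
         (fun ok perm =>
           if PySem.Str.endswith perm ":*" then
             let pfx := PySem.Str.slice perm none (some (-1))
             if PySem.Str.startswith rp pfx then true else ok
           else ok)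
         false) = true ↔
    ("*" ∈ ps ∨ rp ∈ ps ∨ ∃ p ∈ ps, ([':', '*'] <:+ p.toList) ∧ (p.toList.dropLast <+: rp.toList)) := by
  have hbody : (fun ok (perm : String) =>
      if PySem.Str.endswith perm ":*" then
        let pfx := PySem.Str.slice perm none (some (-1))
        if PySem.Str.startswith rp pfx then true else ok
      else ok)
      = (fun ok perm =>
          if (PySem.Str.endswith perm ":*" && PySem.Str.startswith rp (PySem.Str.slice perm none (some (-1)))) then true else ok) := by
    funext ok perm
    cases hE : PySem.Str.endswith perm ":*" <;> simp
  rw [hbody, PySem.List.foldl_if_true_eq]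
  split_ifs with h1 h2
  · simp only [List.contains_iff_mem] at h1
    simp [h1]
  · simp only [List.contains_iff_mem] at h2
    simp [h2]
  · simp only [List.contains_iff_mem] at h1 h2
    simp only [Bool.false_or, List.any_eq_true, Bool.and_eq_true,
      PySem.Str.endswith_eq, PySem.Str.startswith_eq]
    constructor
    · rintro ⟨p, hp, he, hs⟩
      refine Or.inr (Or.inr ⟨p, hp, ?_, ?_⟩)
      · have h := (PySem.Chars.endswith_iff _ _).mp he
        have hl : (":*" : String).toList = [':', '*'] := by decide
        rwa [hl] at h
      · have h := (PySem.Chars.startswith_iff _ _).mp hs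
        rwa [PySem.Str.slice_to_neg_one] at h
    · rintro (h | h | ⟨p, hp, he, hs⟩)
      · exact absurd h h1
      · exact absurd h h2
      · refine ⟨p, hp, ?_, ?_⟩
        · rw [PySem.Chars.endswith_iff]
          have hl : (":*" : String).toList = [':', '*'] := by decide
          rw [hl]; exact he
        · rw [PySem.Chars.startswith_iff, PySem.Str.slice_to_neg_one]
          exact hs

-- B's whole body, characterized.
theorem b_char (ps : List String) (rp : String) :
    (((PySem.List.enumerate rp.toList 0).foldl
      (fun acc p =>
        if p.2 == ':' then
          acc ++ [String.ofList (rp.toList.take (p.1.toNat + 1) ++ ['*'])]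
        else acc)
      ["*", rp]).any (fun c => PySem.Set.contains (PySem.Set.ofList ps) c)) = true ↔
    ("*" ∈ ps ∨ rp ∈ ps ∨
      ∃ x ∈ ((PySem.List.enumerate rp.toList 0).filter (fun p => p.2 == ':')).map
        (fun p : Int × Char => String.ofList (rp.toList.take (p.1.toNat + 1) ++ ['*'])), x ∈ ps) := by
  rw [PySem.List.foldl_append_if (p := fun p : Int × Char => p.2 == ':')
        (f := fun p : Int × Char => String.ofList (rp.toList.take (p.1.toNat + 1) ++ ['*']))]
  have hset : ∀ c : String, PySem.Set.contains (PySem.Set.ofList ps) c = true ↔ c ∈ ps := by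
    intro c; simp [PySem.Set.contains]
  simp only [List.any_append, List.any_cons, List.any_nil, Bool.or_eq_true, Bool.or_false,
    List.any_eq_true, hset]
  exact or_assoc

-- ===== VERDICT (by name: the statement is the Claim_ definition above) =====
theorem check_permission_spec : Claim_equal_check_permission := by
  intro key_info rp _
  show check_permission key_info rp = check_permission_alt key_info rp
  unfold check_permission check_permission_alt
  rw [Bool.eq_iff_iff, a_char, b_char, cand_iff, ← core_iff]
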